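-- pv_equiv track=rewrite | github.com/cloudlinux/kuberdock-platform | kubedock/kapi/pstorage.py | _get_ceph_pool_pgnum_by_osdnum
-- ===== SOURCE A (Python) =====
-- def _get_ceph_pool_pgnum_by_osdnum(osdnum):
--     """Calculates CEPH placement groups number depending on OSDs number.
--     http://docs.ceph.com/docs/hammer/rados/operations/placement-groups/#a-preselection-of-pg-num
--
--     """
--     OSDNUM_TO_PGNUM = ((5, 128), (10, 512), (50, 4096))
--     pgnum = 64
--     for osds, pgn in OSDNUM_TO_PGNUM:
--         if osdnum < osds:
--             pgnum = pgn
--             break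
--     return pgnum
-- ===== SOURCE B (Python) =====
-- def _get_ceph_pool_pgnum_by_osdnum(osdnum):
--     """Table + binary search (bisect_right by hand) instead of a linear
--     scan with break."""
--     thresholds = (5, 10, 50)
--     values = (128, 512, 4096, 64)
--     lo, hi = 0, len(thresholds)
--     while lo < hi:
--         mid = (lo + hi) // 2
--         if osdnum < thresholds[mid]:
--             hi = mid
--         else:
--             lo = mid + 1
--     return values[lo]
-- ===== Notes on version B (the rewrite author's own statement) =====
-- stated objective: alternative
-- what changed: Replaces the linear scan over (threshold, pgnum) pairs with an early break by a parallel-table lookup indexed by a hand-written bisect_right binary search over the thresholds.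
import Mathlib
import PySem

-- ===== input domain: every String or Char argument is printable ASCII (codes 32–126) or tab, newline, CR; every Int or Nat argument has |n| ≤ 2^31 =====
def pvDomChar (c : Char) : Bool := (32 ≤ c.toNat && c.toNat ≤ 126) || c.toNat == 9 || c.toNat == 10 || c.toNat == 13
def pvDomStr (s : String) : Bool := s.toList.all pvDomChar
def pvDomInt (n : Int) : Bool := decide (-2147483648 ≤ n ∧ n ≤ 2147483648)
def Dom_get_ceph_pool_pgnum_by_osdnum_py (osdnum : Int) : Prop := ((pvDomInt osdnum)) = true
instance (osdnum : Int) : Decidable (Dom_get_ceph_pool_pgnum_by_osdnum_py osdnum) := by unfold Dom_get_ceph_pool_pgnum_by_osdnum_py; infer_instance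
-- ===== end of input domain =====

-- B replaces A's linear threshold scan with a parallel table indexed by a hand-written
-- bisect_right binary search (alternative structure, same cost on 3 thresholds).

-- ===== PORT A =====
-- the for-loop with break over OSDNUM_TO_PGNUM
def pvA_loop (osdnum : Int) : List (Int × Int) → Int → Int
  | [], pgnum => pgnum
  | (osds, pgn) :: rest, pgnum =>
      if osdnum < osds then pgn else pvA_loop osdnum rest pgnum

def get_ceph_pool_pgnum_by_osdnum_py (osdnum : Int) : Int :=
  pvA_loop osdnum [(5, 128), (10, 512), (50, 4096)] 64

-- ===== PORT B =====
-- the while-loop binary search (bisect_right) of Source B; fuel = hi - lo makes the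
-- recursion structural (the interval shrinks by at least 1 each iteration)
def pvB_bisect (osdnum : Int) (ts : List Int) : Nat → Nat → Nat → Nat
  | 0, lo, _ => lo
  | fuel + 1, lo, hi =>
      if lo < hi then
        let mid := (lo + hi) / 2
        if osdnum < ts.getD mid 0 then pvB_bisect osdnum ts fuel lo mid
        else pvB_bisect osdnum ts fuel (mid + 1) hi
      else lo

def get_ceph_pool_pgnum_by_osdnum_py_alt (osdnum : Int) : Int :=
  ([128, 512, 4096, 64] : List Int).getD (pvB_bisect osdnum [5, 10, 50] 3 0 3) 0

-- ===== PRECONDITION & SPEC =====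
def Spec_get_ceph_pool_pgnum_by_osdnum_py (osdnum : Int) (out : Int) : Prop := out = get_ceph_pool_pgnum_by_osdnum_py_alt osdnum
instance (osdnum : Int) (out : Int) : Decidable (Spec_get_ceph_pool_pgnum_by_osdnum_py osdnum out) := by unfold Spec_get_ceph_pool_pgnum_by_osdnum_py; infer_instance

-- ===== CLAIM (what is proved, stated in full; the proofs are below) =====
def Claim_equal_get_ceph_pool_pgnum_by_osdnum_py : Prop := ∀ (osdnum : Int), Dom_get_ceph_pool_pgnum_by_osdnum_py osdnum → Spec_get_ceph_pool_pgnum_by_osdnum_py osdnum (get_ceph_pool_pgnum_by_osdnum_py osdnum)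

-- ===== LEMMAS AND PROOFS =====
lemma pv_eq (osdnum : Int) :
    get_ceph_pool_pgnum_by_osdnum_py osdnum = get_ceph_pool_pgnum_by_osdnum_py_alt osdnum := by
  unfold get_ceph_pool_pgnum_by_osdnum_py get_ceph_pool_pgnum_by_osdnum_py_alt
  by_cases h5 : osdnum < 5 <;> by_cases h10 : osdnum < 10 <;> by_cases h50 : osdnum < 50 <;>
    simp [pvA_loop, pvB_bisect, h5, h10, h50] <;> omega

-- ===== VERDICT (by name: the statement is the Claim_ definition above) =====
theorem get_ceph_pool_pgnum_by_osdnum_py_spec : Claim_equal_get_ceph_pool_pgnum_by_osdnum_py := by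
  intro osdnum _
  exact pv_eq osdnum
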